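-- pv_equiv track=rewrite | github.com/dwats250/trading-system | outputs/options_html.py | _primary_disqualifier
-- ===== SOURCE A (Python) =====
-- def _primary_disqualifier(reasons: list[str]) -> str:
--     """Single most important failure reason for trader-facing display."""
--     checks = [
--         ("regime",         "Conflicts with current macro regime"),
--         ("R:R",            "R:R below 2:1 — risk not justified"),
--         ("Chart grade",    "Chart not A-grade yet"),
--         ("No clear chart", "No clear setup structure"),
--         ("liquidity",      "Options liquidity insufficient"),
--     ]
--     for keyword, label in checks:
--         for r in reasons:
--             if keyword.lower() in r.lower():
--                 return label
--     return reasons[0] if reasons else "Failed guardrails"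
-- ===== SOURCE B (Python) =====
-- def _primary_disqualifier(reasons: list[str]) -> str:
--     """Single most important failure reason for trader-facing display."""
--     keywords = ["regime", "r:r", "chart grade", "no clear chart", "liquidity"]
--     labels = [
--         "Conflicts with current macro regime",
--         "R:R below 2:1 — risk not justified",
--         "Chart not A-grade yet",
--         "No clear setup structure",
--         "Options liquidity insufficient",
--     ]
--     present = set()
--     for r in reasons:
--         low = r.lower()
--         for i, kw in enumerate(keywords):
--             if kw in low:
--                 present.add(i)
--     for i, label in enumerate(labels):
--         if i in present:
--             return label
--     return reasons[0] if reasons else "Failed guardrails"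
-- ===== Notes on version B (the rewrite author's own statement) =====
-- stated objective: alternative
-- what changed: Instead of scanning the whole reasons list once per keyword in priority order (5 repeated scans with early return), B makes one pass over reasons building a set of all keyword indices present, then a second pass over the labels in priority order returning the first whose index is in the set.
import Mathlib
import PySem

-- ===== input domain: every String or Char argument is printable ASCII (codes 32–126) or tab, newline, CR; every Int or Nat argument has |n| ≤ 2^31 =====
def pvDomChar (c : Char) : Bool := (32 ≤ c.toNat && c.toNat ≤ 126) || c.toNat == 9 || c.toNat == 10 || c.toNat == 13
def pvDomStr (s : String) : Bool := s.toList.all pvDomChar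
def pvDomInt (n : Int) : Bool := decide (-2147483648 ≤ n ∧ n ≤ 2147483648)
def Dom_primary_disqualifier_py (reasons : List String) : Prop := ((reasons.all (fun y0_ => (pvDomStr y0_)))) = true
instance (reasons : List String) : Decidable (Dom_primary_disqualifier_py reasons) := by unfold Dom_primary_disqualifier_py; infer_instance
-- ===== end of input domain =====

-- B replaces A's five priority-ordered scans of `reasons` (early return) by one pass over
-- `reasons` building the set of keyword indices present, then a priority pass over the labels.

-- ===== PORT A =====
def aChecks : List (String × String) :=
  [("regime", "Conflicts with current macro regime"),
   ("R:R", "R:R below 2:1 — risk not justified"),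
   ("Chart grade", "Chart not A-grade yet"),
   ("No clear chart", "No clear setup structure"),
   ("liquidity", "Options liquidity insufficient")]

-- inner loop: 'for r in reasons: if keyword.lower() in r.lower(): return label' (found?)
def aInner (keyword : String) : List String → Bool
  | [] => false
  | r :: rs =>
      if PySem.Str.isIn (PySem.Str.lower keyword) (PySem.Str.lower r) then true
      else aInner keyword rs

-- outer loop over checks, returning the label on the first keyword found
def aOuter (reasons : List String) : List (String × String) → Option String
  | [] => none
  | (keyword, label) :: rest =>
      if aInner keyword reasons then some label else aOuter reasons rest

def primary_disqualifier_py (reasons : List String) : String :=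
  match aOuter reasons aChecks with
  | some label => label
  | none => match reasons with
            | [] => "Failed guardrails"
            | r :: _ => r

-- ===== PORT B =====
def bKeywords : List String := ["regime", "r:r", "chart grade", "no clear chart", "liquidity"]
def bLabels : List String :=
  ["Conflicts with current macro regime",
   "R:R below 2:1 — risk not justified",
   "Chart not A-grade yet",
   "No clear setup structure",
   "Options liquidity insufficient"]

-- one reason: add every matching keyword's index to the set
def bInner (acc : PySem.Set Int) (r : String) : PySem.Set Int :=
  let low := PySem.Str.lower r
  (PySem.List.enumerate bKeywords).foldl
    (fun a p => if PySem.Str.isIn p.2 low then PySem.Set.add a p.1 else a) acc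

def bPresent (reasons : List String) : PySem.Set Int :=
  reasons.foldl bInner PySem.Set.empty

-- priority pass: first label whose index is present
def bSelect (present : PySem.Set Int) : List (Int × String) → Option String
  | [] => none
  | (i, label) :: rest =>
      if PySem.Set.contains present i then some label else bSelect present rest

def primary_disqualifier_py_alt (reasons : List String) : String :=
  match bSelect (bPresent reasons) (PySem.List.enumerate bLabels) with
  | some label => label
  | none => match reasons with
            | [] => "Failed guardrails"
            | r :: _ => r

-- ===== PRECONDITION & SPEC =====
def Spec_primary_disqualifier_py (reasons : List String) (out : String) : Prop := out = primary_disqualifier_py_alt reasons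
instance (reasons : List String) (out : String) : Decidable (Spec_primary_disqualifier_py reasons out) := by unfold Spec_primary_disqualifier_py; infer_instance

-- ===== CLAIM (what is proved, stated in full; the proofs are below) =====
def Claim_equal_primary_disqualifier_py : Prop := ∀ (reasons : List String), Dom_primary_disqualifier_py reasons → Spec_primary_disqualifier_py reasons (primary_disqualifier_py reasons)

-- ===== LEMMAS AND PROOFS =====

theorem aInner_eq_any (kw : String) (rs : List String) :
    aInner kw rs = rs.any (fun r => PySem.Str.isIn (PySem.Str.lower kw) (PySem.Str.lower r)) := by
  induction rs with
  | nil => rfl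
  | cons r rs ih =>
      cases hc : PySem.Str.isIn (PySem.Str.lower kw) (PySem.Str.lower r) <;>
        simp [aInner, hc, ih]

theorem mem_bInner (acc : PySem.Set Int) (r : String) (k : Int) (kw : String)
    (h : (k, kw) ∈ PySem.List.enumerate bKeywords) :
    k ∈ bInner acc r ↔ (k ∈ acc ∨ PySem.Str.isIn kw (PySem.Str.lower r) = true) := by
  simp only [bKeywords, PySem.List.enumerate_cons, PySem.List.enumerate_nil,
    List.mem_cons, List.not_mem_nil, or_false, Prod.mk.injEq] at h
  simp only [bInner, bKeywords, PySem.List.enumerate_cons, PySem.List.enumerate_nil,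
    List.foldl_cons, List.foldl_nil]
  rcases h with ⟨hk, hw⟩ | ⟨hk, hw⟩ | ⟨hk, hw⟩ | ⟨hk, hw⟩ | ⟨hk, hw⟩ <;>
    (subst hk; subst hw; split_ifs <;> simp_all [PySem.Set.mem_add])

theorem mem_bPresent (reasons : List String) (k : Int) (kw : String)
    (h : (k, kw) ∈ PySem.List.enumerate bKeywords) :
    k ∈ bPresent reasons ↔ (reasons.any (fun r => PySem.Str.isIn kw (PySem.Str.lower r)) = true) := by
  have key : ∀ (rs : List String) (acc : PySem.Set Int),
      k ∈ rs.foldl bInner acc ↔ (k ∈ acc ∨ rs.any (fun r => PySem.Str.isIn kw (PySem.Str.lower r)) = true) := by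
    intro rs
    induction rs with
    | nil => simp
    | cons r rs ih =>
        intro acc
        simp only [List.foldl_cons, ih, mem_bInner acc r k kw h, List.any_cons, Bool.or_eq_true]
        tauto
  simpa [bPresent, PySem.Set.empty] using key reasons PySem.Set.empty

theorem contains_bPresent (reasons : List String) (k : Int) (kw : String)
    (h : (k, kw) ∈ PySem.List.enumerate bKeywords) :
    PySem.Set.contains (bPresent reasons) k
      = reasons.any (fun r => PySem.Str.isIn kw (PySem.Str.lower r)) := by
  rw [Bool.eq_iff_iff, PySem.Set.contains_iff, mem_bPresent reasons k kw h]

-- ===== VERDICT (by name: the statement is the Claim_ definition above) =====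
theorem primary_disqualifier_py_spec : Claim_equal_primary_disqualifier_py := by
  intro reasons _
  unfold Spec_primary_disqualifier_py primary_disqualifier_py primary_disqualifier_py_alt
  simp only [aChecks, aOuter, aInner_eq_any, bLabels, PySem.List.enumerate_cons,
    PySem.List.enumerate_nil, bSelect,
    contains_bPresent reasons 0 "regime" (by decide),
    show PySem.Str.lower "regime" = "regime" from by decide,
    show PySem.Str.lower "R:R" = "r:r" from by decide,
    show PySem.Str.lower "Chart grade" = "chart grade" from by decide,
    show PySem.Str.lower "No clear chart" = "no clear chart" from by decide,
    show PySem.Str.lower "liquidity" = "liquidity" from by decide]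
  norm_num
  simp [mem_bPresent reasons 1 "r:r" (by decide),
    mem_bPresent reasons 2 "chart grade" (by decide),
    mem_bPresent reasons 3 "no clear chart" (by decide),
    mem_bPresent reasons 4 "liquidity" (by decide)]
  rfl
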